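-- pv_equiv track=rewrite | github.com/spencerhirsch/sudoku | testing_playground/solvers.py | get_unused_numbers
-- ===== SOURCE A (Python) =====
-- def get_unused_numbers(board, cord1, cord2, size):
--
--     nums = set(range(1, size + 1))
--     # Iterate through col, and remove dupes from set
--
--     for i in range (size):
--         current_num = int(board[i][cord2])
--         if current_num in nums:
--             nums.remove(current_num)
--
--     # Iterate through row, and remove dupes from set
--
--     for j in range (size):
--         current_num = int(board[cord1][j])
--         if current_num in nums:
--             nums.remove(current_num)
--
--     return list(nums)
-- ===== SOURCE B (Python) =====
-- def get_unused_numbers(board, cord1, cord2, size):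
--     result = []
--     for n in range(1, size + 1):
--         found = False
--         for i in range(size):
--             if int(board[i][cord2]) == n or int(board[cord1][i]) == n:
--                 found = True
--                 break
--         if not found:
--             result.append(n)
--     return result
-- ===== Notes on version B (the rewrite author's own statement) =====
-- stated objective: alternative
-- what changed: B drops the set entirely: for each candidate n in 1..size it does a nested existence scan over the column and row with an early break, appending n when absent, instead of A's set-difference via guarded removals; it trades O(size) set operations for an O(size^2) candidate-driven double loop.
import Mathlib
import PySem

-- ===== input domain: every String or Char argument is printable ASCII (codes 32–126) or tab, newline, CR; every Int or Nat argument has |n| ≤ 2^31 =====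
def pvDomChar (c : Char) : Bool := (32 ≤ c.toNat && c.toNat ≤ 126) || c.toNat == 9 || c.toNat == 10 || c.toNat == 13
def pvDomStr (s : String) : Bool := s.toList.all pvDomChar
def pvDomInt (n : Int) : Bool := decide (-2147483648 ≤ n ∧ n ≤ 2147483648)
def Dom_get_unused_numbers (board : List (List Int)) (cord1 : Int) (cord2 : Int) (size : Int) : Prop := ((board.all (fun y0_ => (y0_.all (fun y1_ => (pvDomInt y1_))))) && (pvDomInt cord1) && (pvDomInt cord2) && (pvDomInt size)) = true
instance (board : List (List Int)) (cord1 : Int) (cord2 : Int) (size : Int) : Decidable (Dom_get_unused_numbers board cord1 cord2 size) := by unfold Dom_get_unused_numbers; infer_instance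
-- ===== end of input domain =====

-- B replaces A's set-difference (guarded removals from a candidate set) with a
-- brute-force per-candidate existence scan: for each n in 1..size a nested loop over
-- the column and row with an early break — objective: alternative (O(size^2) vs O(size)).
-- Port note: A's 'list(nums)' iterates a CPython set whose elements all lie in 1..size;
-- for such small nonnegative ints hash order equals ascending insertion order and removals
-- do not reorder, so PySem.Set's insertion-order list is exact here.


-- ===== PORT A =====
def get_unused_numbers (board : List (List Int)) (cord1 : Int) (cord2 : Int) (size : Int) : List Int :=
  let nums : PySem.Set Int := PySem.Set.ofList (PySem.List.pyRange 1 (size + 1) 1)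
  let nums := (PySem.List.pyRange 0 size 1).foldl (fun ns i =>
      let current_num := PySem.List.pyGetD (PySem.List.pyGetD board i []) cord2 0
      if PySem.Set.contains ns current_num then PySem.Set.discard ns current_num else ns) nums
  let nums := (PySem.List.pyRange 0 size 1).foldl (fun ns j =>
      let current_num := PySem.List.pyGetD (PySem.List.pyGetD board cord1 []) j 0
      if PySem.Set.contains ns current_num then PySem.Set.discard ns current_num else ns) nums
  nums

-- ===== PORT B =====
-- inner 'for i … if …: found = True; break' is exactly List.any over range(size)
def get_unused_numbers_alt (board : List (List Int)) (cord1 : Int) (cord2 : Int) (size : Int) : List Int :=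
  (PySem.List.pyRange 1 (size + 1) 1).foldl (fun result n =>
    let found := (PySem.List.pyRange 0 size 1).any (fun i =>
      PySem.List.pyGetD (PySem.List.pyGetD board i []) cord2 0 == n ||
      PySem.List.pyGetD (PySem.List.pyGetD board cord1 []) i 0 == n)
    if !found then result ++ [n] else result) []

-- ===== PRECONDITION & SPEC =====
-- Pre_ excludes exactly the IndexError inputs: whenever the loops run (0 < size), every
-- row index i in 0..size-1 and cord1 must be valid indices into board, and cord2 / every
-- j in 0..size-1 valid indices into the accessed rows.
def Pre_get_unused_numbers (board : List (List Int)) (cord1 : Int) (cord2 : Int) (size : Int) : Prop :=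
  0 < size →
    (size ≤ board.length ∧
     (∀ row ∈ board.take size.toNat, PySem.Raise.InRange row.length cord2) ∧
     PySem.Raise.InRange board.length cord1 ∧
     size ≤ (PySem.List.pyGetD board cord1 []).length)
instance (board : List (List Int)) (cord1 : Int) (cord2 : Int) (size : Int) : Decidable (Pre_get_unused_numbers board cord1 cord2 size) := by unfold Pre_get_unused_numbers; infer_instance

def pvWitness_get_unused_numbers : List (List Int) × Int × Int × Int := ([[1, 2], [3, 4]], 0, 1, 2)

def Spec_get_unused_numbers (board : List (List Int)) (cord1 : Int) (cord2 : Int) (size : Int) (out : List Int) : Prop := out = get_unused_numbers_alt board cord1 cord2 size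
instance (board : List (List Int)) (cord1 : Int) (cord2 : Int) (size : Int) (out : List Int) : Decidable (Spec_get_unused_numbers board cord1 cord2 size out) := by unfold Spec_get_unused_numbers; infer_instance

-- ===== CLAIM (what is proved, stated in full; the proofs are below) =====
def Claim_equal_get_unused_numbers : Prop := ∀ (board : List (List Int)) (cord1 : Int) (cord2 : Int) (size : Int), Dom_get_unused_numbers board cord1 cord2 size → Pre_get_unused_numbers board cord1 cord2 size → Spec_get_unused_numbers board cord1 cord2 size (get_unused_numbers board cord1 cord2 size)

-- ===== LEMMAS AND PROOFS =====

-- A's loop: folding a guarded remove of (f i) over l filters out every value in l.map f.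
theorem foldl_guarded_discard (f : Int → Int) (l : List Int) (S : List Int) :
    l.foldl (fun ns i =>
        let v := f i
        if PySem.Set.contains ns v then PySem.Set.discard ns v else ns) S
      = S.filter (fun x => !((l.map f).contains x)) := by
  induction l generalizing S with
  | nil => simp
  | cons a t ih =>
    have hstep : (if PySem.Set.contains S (f a) then PySem.Set.discard S (f a) else S)
        = S.filter (fun x => !(x == f a)) := by
      by_cases h : f a ∈ S
      · simp [PySem.Set.contains, PySem.Set.discard, h]
      · have he : S.filter (fun x => !(x == f a)) = S :=
          List.filter_eq_self.mpr (fun b hb => by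
            have hne : b ≠ f a := fun hba => h (hba ▸ hb)
            simp [hne])
        simp [he]
        exact fun hmem => absurd hmem h
    simp only [List.foldl_cons, hstep, ih, List.filter_filter, List.map_cons]
    apply List.filter_congr
    intro x _
    by_cases hxa : x = f a <;> simp [hxa]

-- ===== VERDICT (by name: the statement is the Claim_ definition above) =====
theorem get_unused_numbers_spec : Claim_equal_get_unused_numbers := by
  intro board cord1 cord2 size _ _
  unfold Spec_get_unused_numbers get_unused_numbers get_unused_numbers_alt
  simp only [foldl_guarded_discard, List.filter_filter,
    PySem.List.foldl_append_if_eq_filter]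
  rw [PySem.Set.ofList_eq_self_of_nodup _ (PySem.List.nodup_pyRange_one 1 (size + 1))]
  simp only [List.nil_append]
  apply List.filter_congr
  intro x _
  rw [Bool.eq_iff_iff]
  simp
  constructor
  · rintro ⟨h2, h1⟩ i h0 hs
    exact ⟨h1 i h0 hs, h2 i h0 hs⟩
  · intro h
    exact ⟨fun i h0 hs => (h i h0 hs).2, fun i h0 hs => (h i h0 hs).1⟩
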